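-- pv_equiv track=rewrite | github.com/MuKeP/fmakefile | fmakefile/makefile.py | dequote
-- ===== SOURCE A (Python) =====
-- def dequote(line):
--     '''
--     Gentle quotes stripping.
--     '''
--     while True:
--         if line.startswith('"') or line.startswith("'"):
--             line = line[1:]
--         else:
--             break
--
--     while True:
--         if line.endswith('"') or line.endswith("'"):
--             line = line[:-1]
--         else:
--             break
--     return line
-- ===== SOURCE B (Python) =====
-- def dequote(line):
--     '''
--     Gentle quotes stripping.
--     '''
--     i = 0
--     n = len(line)
--     while i < n and line[i] in '"\'':
--         i += 1
--     j = n
--     while j > i and line[j - 1] in '"\'':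
--         j -= 1
--     return line[i:j]
-- ===== Notes on version B (the rewrite author's own statement) =====
-- stated objective: simpler
-- what changed: B finds the two boundary indices with index scans and returns one slice, instead of A's two while-loops that rebuild the string by repeated slicing.
import Mathlib
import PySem

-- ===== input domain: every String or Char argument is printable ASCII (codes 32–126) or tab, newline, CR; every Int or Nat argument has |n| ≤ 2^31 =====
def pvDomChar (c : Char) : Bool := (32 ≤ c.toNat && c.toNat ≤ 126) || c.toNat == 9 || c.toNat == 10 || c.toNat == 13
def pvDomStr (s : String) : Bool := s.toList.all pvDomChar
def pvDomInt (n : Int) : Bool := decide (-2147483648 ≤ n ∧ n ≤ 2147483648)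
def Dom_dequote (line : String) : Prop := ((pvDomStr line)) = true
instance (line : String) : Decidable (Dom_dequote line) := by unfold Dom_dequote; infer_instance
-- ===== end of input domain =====

-- B strips the quotes by locating the two boundary indices and taking one slice, instead of A's repeated re-slicing loops.

-- ===== PORT A =====
def pvIsQ (c : Char) : Bool := c == '"' || c == '\''

-- first while-loop of A: while startswith quote, line = line[1:]
def pvStripFront : List Char → List Char
  | [] => []
  | c :: cs => if pvIsQ c then pvStripFront cs else c :: cs

-- second while-loop of A: while endswith quote, line = line[:-1]
def pvStripBack (l : List Char) : List Char :=
  if h : l = [] then l            -- endswith is false on the empty string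
  else if pvIsQ (l.getLast h) then pvStripBack l.dropLast else l
termination_by l.length
decreasing_by
  have : 0 < l.length := List.length_pos_of_ne_nil h
  simp [List.length_dropLast]; omega

def dequote (line : String) : String :=
  String.ofList (pvStripBack (pvStripFront line.toList))

-- ===== PORT B =====
-- first while-loop of Source B: advance i while line[i] is a quote
def pvFindI (l : List Char) (i : Nat) : Nat :=
  if h : i < l.length then
    if pvIsQ l[i] then pvFindI l (i + 1) else i
  else i
termination_by l.length - i

-- second while-loop of Source B: decrease j while j > i and line[j-1] is a quote
def pvFindJ (l : List Char) (i j : Nat) : Nat :=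
  if i < j then
    if pvIsQ (l.getD (j - 1) ' ') then pvFindJ l i (j - 1) else j
  else j
termination_by j
decreasing_by omega

def dequote_alt (line : String) : String :=
  let l := line.toList
  let i := pvFindI l 0
  let j := pvFindJ l i l.length
  -- line[i:j] with 0 ≤ i ≤ j ≤ len(line): exactly take/drop
  String.ofList ((l.drop i).take (j - i))

-- ===== PRECONDITION & SPEC =====
def Spec_dequote (line : String) (out : String) : Prop := out = dequote_alt line
instance (line : String) (out : String) : Decidable (Spec_dequote line out) := by unfold Spec_dequote; infer_instance

-- ===== CLAIM (what is proved, stated in full; the proofs are below) =====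
def Claim_equal_dequote : Prop := ∀ (line : String), Dom_dequote line → Spec_dequote line (dequote line)

-- ===== LEMMAS AND PROOFS =====

theorem pvFindI_le (l : List Char) (i : Nat) (h : i ≤ l.length) : pvFindI l i ≤ l.length := by
  fun_induction pvFindI l i with
  | case1 i h1 h2 ih => exact ih (by omega)
  | case2 i h1 h2 => omega
  | case3 i h1 => omega

theorem drop_pvFindI (l : List Char) (i : Nat) :
    l.drop (pvFindI l i) = pvStripFront (l.drop i) := by
  fun_induction pvFindI l i with
  | case1 i h1 h2 ih =>
      rw [ih, List.drop_eq_getElem_cons h1, pvStripFront, if_pos h2]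
  | case2 i h1 h2 =>
      rw [List.drop_eq_getElem_cons h1, pvStripFront, if_neg h2]
  | case3 i h1 =>
      rw [List.drop_of_length_le (by omega), pvStripFront]

theorem take_pvFindJ (l : List Char) (i j : Nat) (hj : j ≤ l.length) (hij : i ≤ j) :
    (l.drop i).take (pvFindJ l i j - i) = pvStripBack ((l.drop i).take (j - i)) := by
  fun_induction pvFindJ l i j with
  | case1 j h1 h2 ih =>
      -- last char of the current slice is a quote: both sides drop it
      have hlen : ((l.drop i).take (j - i)).length = j - i := by
        simp [List.length_take, List.length_drop]; omega
      have hlast : ((l.drop i).take (j - i)).getLast? = some l[j - 1] := by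
        rw [List.getLast?_eq_getElem?, hlen]
        have hk : j - i - 1 < ((l.drop i).take (j - i)).length := by omega
        rw [List.getElem?_eq_getElem hk]
        congr 1
        rw [List.getElem_take, List.getElem_drop]
        congr 1; omega
      have hget : l.getD (j - 1) ' ' = l[j - 1] := List.getD_eq_getElem l ' ' (by omega)
      have hne : (l.drop i).take (j - i) ≠ [] := by
        intro e; rw [e] at hlen; simp at hlen; omega
      have hlastv : ((l.drop i).take (j - i)).getLast hne = l[j - 1] := by
        have h' := List.getLast?_eq_some_getLast hne
        rw [h'] at hlast; exact Option.some.inj hlast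
      rw [pvStripBack, dif_neg hne, hlastv, if_pos (by rwa [hget] at h2)]
      have hdl : ((l.drop i).take (j - i)).dropLast = (l.drop i).take (j - 1 - i) := by
        rw [List.dropLast_eq_take, hlen, List.take_take]
        congr 1; omega
      rw [hdl]
      exact ih (by omega) (by omega)
  | case2 j h1 h2 =>
      -- last char is not a quote: pvStripBack returns the slice unchanged
      have hlen : ((l.drop i).take (j - i)).length = j - i := by
        simp [List.length_take, List.length_drop]; omega
      have hlast : ((l.drop i).take (j - i)).getLast? = some l[j - 1] := by
        rw [List.getLast?_eq_getElem?, hlen]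
        have hk : j - i - 1 < ((l.drop i).take (j - i)).length := by omega
        rw [List.getElem?_eq_getElem hk]
        congr 1
        rw [List.getElem_take, List.getElem_drop]
        congr 1; omega
      have hget : l.getD (j - 1) ' ' = l[j - 1] := List.getD_eq_getElem l ' ' (by omega)
      have hne : (l.drop i).take (j - i) ≠ [] := by
        intro e; rw [e] at hlen; simp at hlen; omega
      have hlastv : ((l.drop i).take (j - i)).getLast hne = l[j - 1] := by
        have h' := List.getLast?_eq_some_getLast hne
        rw [h'] at hlast; exact Option.some.inj hlast
      rw [pvStripBack, dif_neg hne, hlastv, if_neg (by rwa [hget] at h2)]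
  | case3 j h1 =>
      have : j = i := by omega
      subst this
      simp [pvStripBack]

-- ===== VERDICT (by name: the statement is the Claim_ definition above) =====
theorem dequote_spec : Claim_equal_dequote := by
  intro line _
  unfold Spec_dequote dequote dequote_alt
  set l := line.toList with hl
  have hi : pvFindI l 0 ≤ l.length := pvFindI_le l 0 (by omega)
  have h1 := take_pvFindJ l (pvFindI l 0) l.length le_rfl hi
  have h2 : (l.drop (pvFindI l 0)).take (l.length - pvFindI l 0) = l.drop (pvFindI l 0) := by
    apply List.take_of_length_le
    simp [List.length_drop]
  rw [h2] at h1
  simp only []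
  rw [h1, drop_pvFindI, List.drop_zero]
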